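-- pv_equiv track=rewrite | github.com/blackeagle8100/HyTaleModTester | modtester.py | extract_warning_error_block
-- ===== SOURCE A (Python) =====
-- def extract_warning_error_block(lines: list[str], mod_id: str, context: int = 8, max_blocks: int = 12) -> list[str]:
--     """
--     Find warnings/errors around the mod and include context so it's easy to copy-paste.
--     """
--     mod_id_lower = mod_id.lower()
--     short_name = mod_id.split(":")[-1].lower() if ":" in mod_id else mod_id.lower()
--
--     match_indexes = []
--     for i, line in enumerate(lines):
--         l = line.lower()
--         if (
--             mod_id_lower in l
--             or short_name in l
--             or "failed to setup plugin" in l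
--             or "lacking dependency" in l
--             or "enabled plugin" in l
--             or "skipping mod" in l
--             or "loaded pack" in l
--         ):
--             match_indexes.append(i)
--
--     blocks = []
--     used_ranges = []
--
--     def overlaps(a1, a2, b1, b2):
--         return not (a2 < b1 or b2 < a1)
--
--     for idx in match_indexes:
--         start = max(0, idx - context)
--         end = min(len(lines) - 1, idx + context)
--
--         is_err_block = False
--         for j in range(start, end + 1):
--             lj = lines[j].lower()
--             if any(x in lj for x in ["warn", "error", "severe", "exception", "caused by", "failed"]):
--                 is_err_block = True
--                 break
--
--         if not is_err_block:
--             continue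
--
--         skip = False
--         for r1, r2 in used_ranges:
--             if overlaps(start, end, r1, r2):
--                 skip = True
--                 break
--         if skip:
--             continue
--
--         used_ranges.append((start, end))
--         header = f"--- block around line {idx + 1} ---"
--         body = [lines[j].rstrip() for j in range(start, end + 1)]
--         blocks.append(header)
--         blocks.extend(body)
--         blocks.append("")
--
--         if len(blocks) >= max_blocks * (context * 2 + 3):
--             break
--
--     return blocks[:2000]
-- ===== SOURCE B (Python) =====
-- def extract_warning_error_block(lines: list[str], mod_id: str, context: int = 8, max_blocks: int = 12) -> list[str]:
--     """
--     Find warnings/errors around the mod and include context so it's easy to copy-paste.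
--     """
--     mod_id_lower = mod_id.lower()
--     short_name = mod_id.split(":")[-1].lower() if ":" in mod_id else mod_id.lower()
--     keys = (mod_id_lower, short_name, "failed to setup plugin", "lacking dependency",
--             "enabled plugin", "skipping mod", "loaded pack")
--     err_words = ("warn", "error", "severe", "exception", "caused by", "failed")
--
--     n = len(lines)
--     lows = [s.lower() for s in lines]
--     # prefix[k] = number of lines among lines[0:k] containing an error keyword,
--     # so a window [start, end] contains one iff prefix[end+1] - prefix[start] > 0.
--     prefix = [0] * (n + 1)
--     for j, low in enumerate(lows):
--         prefix[j + 1] = prefix[j] + (1 if any(w in low for w in err_words) else 0)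
--
--     limit = max_blocks * (context * 2 + 3)
--     blocks = []
--     last_end = None  # windows come in increasing order: overlap iff start <= last_end
--     for i, low in enumerate(lows):
--         if not any(k in low for k in keys):
--             continue
--         start = max(0, i - context)
--         end = min(n - 1, i + context)
--         if end < start:
--             continue
--         if prefix[end + 1] - prefix[start] == 0:
--             continue
--         if last_end is not None and start <= last_end:
--             continue
--         last_end = end
--         blocks.append(f"--- block around line {i + 1} ---")
--         blocks.extend(lines[j].rstrip() for j in range(start, end + 1))
--         blocks.append("")
--         if len(blocks) >= limit:
--             break
--     return blocks[:2000]
-- ===== Notes on version B (the rewrite author's own statement) =====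
-- stated objective: alternative
-- what changed: B lowercases each line once and precomputes a prefix-sum table of error-keyword hits so the per-match window scan becomes an O(1) subtraction, and replaces the used_ranges list plus overlaps() helper with a single last_end variable (valid because windows arrive with non-decreasing start/end).
import Mathlib
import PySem

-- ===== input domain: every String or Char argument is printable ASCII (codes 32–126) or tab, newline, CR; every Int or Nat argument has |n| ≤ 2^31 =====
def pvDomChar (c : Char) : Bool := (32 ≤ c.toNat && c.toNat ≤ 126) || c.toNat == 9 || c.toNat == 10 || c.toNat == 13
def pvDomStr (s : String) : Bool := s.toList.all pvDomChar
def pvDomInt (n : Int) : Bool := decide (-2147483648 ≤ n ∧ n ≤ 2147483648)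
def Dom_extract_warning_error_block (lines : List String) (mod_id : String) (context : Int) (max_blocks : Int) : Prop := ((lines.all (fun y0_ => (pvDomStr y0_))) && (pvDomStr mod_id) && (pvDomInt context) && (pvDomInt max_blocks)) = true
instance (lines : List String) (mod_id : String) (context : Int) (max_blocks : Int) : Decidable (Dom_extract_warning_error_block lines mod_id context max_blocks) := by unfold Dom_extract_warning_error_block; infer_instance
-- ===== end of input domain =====

-- B lowercases every line once, precomputes a prefix-sum table of error-keyword hits so the
-- per-match window scan becomes one O(1) subtraction, and replaces A's used_ranges/overlaps()
-- scan by a single last_end variable (windows arrive with non-decreasing ends, so overlap ⟺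
-- start ≤ last_end); objective: faster is not claimed — alternative. Return value only.

-- ===== PORT A =====
def pvA_errWords : List String :=
  ["warn", "error", "severe", "exception", "caused by", "failed"]

def pvA_loop (lines : List String) (context limit : Int) :
    List Int → List String → List (Int × Int) → List String
  | [], blocks, _ => blocks
  | idx :: rest, blocks, used =>
    let start := max 0 (idx - context)
    let fin := min ((lines.length : Int) - 1) (idx + context)
    let is_err := (PySem.List.pyRange start (fin + 1) 1).any (fun j =>
        let lj := PySem.Str.lower (PySem.List.pyGetD lines j "")
        pvA_errWords.any (fun x => PySem.Str.isIn x lj))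
    if !is_err then pvA_loop lines context limit rest blocks used
    else
      let skip := used.any (fun r => !(decide (fin < r.1) || decide (r.2 < start)))
      if skip then pvA_loop lines context limit rest blocks used
      else
        let header := "--- block around line " ++ PySem.Int.toStr (idx + 1) ++ " ---"
        let body := (PySem.List.pyRange start (fin + 1) 1).map
          (fun j => PySem.Str.rstrip (PySem.List.pyGetD lines j ""))
        let blocks' := blocks ++ [header] ++ body ++ [""]
        if limit ≤ (blocks'.length : Int) then blocks'
        else pvA_loop lines context limit rest blocks' (used ++ [(start, fin)])

def extract_warning_error_block (lines : List String) (mod_id : String) (context : Int) (max_blocks : Int) : List String :=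
  let mod_id_lower := PySem.Str.lower mod_id
  let short_name :=
    if PySem.Str.isIn ":" mod_id then
      PySem.Str.lower (PySem.List.pyGetD ((PySem.Str.split? mod_id ":").getD []) (-1) "")
    else PySem.Str.lower mod_id
  let match_indexes := (PySem.List.enumerate lines).foldl (fun acc p =>
      if (let l := PySem.Str.lower p.2
          PySem.Str.isIn mod_id_lower l || PySem.Str.isIn short_name l
          || PySem.Str.isIn "failed to setup plugin" l || PySem.Str.isIn "lacking dependency" l
          || PySem.Str.isIn "enabled plugin" l || PySem.Str.isIn "skipping mod" l
          || PySem.Str.isIn "loaded pack" l) then acc ++ [p.1] else acc) []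
  let blocks := pvA_loop lines context (max_blocks * (context * 2 + 3)) match_indexes [] []
  PySem.List.slice blocks none (some 2000)

-- ===== PORT B =====
def pvB_errWords : List String :=
  ["warn", "error", "severe", "exception", "caused by", "failed"]

def pvB_keys (mod_id_lower short_name : String) : List String :=
  [mod_id_lower, short_name, "failed to setup plugin", "lacking dependency",
   "enabled plugin", "skipping mod", "loaded pack"]

-- the 'for j, low in enumerate(lows): prefix[j+1] = prefix[j] + flag' pass, carrying prefix[j]
def pvB_prefixLoop : List String → List Int → Int → List Int
  | [], pre, _ => pre
  | low :: rest, pre, c =>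
    let c' := c + (if pvB_errWords.any (fun w => PySem.Str.isIn w low) then 1 else 0)
    pvB_prefixLoop rest (pre ++ [c']) c'

def pvB_loop (lines : List String) (pvPre : List Int) (keys : List String)
    (context limit : Int) :
    List (Int × String) → List String → Option Int → List String
  | [], blocks, _ => blocks
  | (i, low) :: rest, blocks, lastEnd =>
    if !(keys.any (fun k => PySem.Str.isIn k low)) then
      pvB_loop lines pvPre keys context limit rest blocks lastEnd
    else
      let start := max 0 (i - context)
      let fin := min ((lines.length : Int) - 1) (i + context)
      if fin < start then pvB_loop lines pvPre keys context limit rest blocks lastEnd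
      else
        if PySem.List.pyGetD pvPre (fin + 1) 0 - PySem.List.pyGetD pvPre start 0 = 0 then
          pvB_loop lines pvPre keys context limit rest blocks lastEnd
        else
          let skip := match lastEnd with
            | some e => decide (start ≤ e)
            | none => false
          if skip then pvB_loop lines pvPre keys context limit rest blocks lastEnd
          else
            let blocks' := blocks ++ ["--- block around line " ++ PySem.Int.toStr (i + 1) ++ " ---"]
              ++ (PySem.List.pyRange start (fin + 1) 1).map
                   (fun j => PySem.Str.rstrip (PySem.List.pyGetD lines j "")) ++ [""]
            if limit ≤ (blocks'.length : Int) then blocks'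
            else pvB_loop lines pvPre keys context limit rest blocks' (some fin)

def extract_warning_error_block_alt (lines : List String) (mod_id : String) (context : Int) (max_blocks : Int) : List String :=
  let mod_id_lower := PySem.Str.lower mod_id
  let short_name :=
    if PySem.Str.isIn ":" mod_id then
      PySem.Str.lower (PySem.List.pyGetD ((PySem.Str.split? mod_id ":").getD []) (-1) "")
    else PySem.Str.lower mod_id
  let lows := lines.map PySem.Str.lower
  let pvPre := pvB_prefixLoop lows [0] 0
  let blocks := pvB_loop lines pvPre (pvB_keys mod_id_lower short_name) context
    (max_blocks * (context * 2 + 3)) (PySem.List.enumerate lows) [] none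
  PySem.List.slice blocks none (some 2000)

-- ===== PRECONDITION & SPEC =====
def Spec_extract_warning_error_block (lines : List String) (mod_id : String) (context : Int) (max_blocks : Int) (out : List String) : Prop := out = extract_warning_error_block_alt lines mod_id context max_blocks
instance (lines : List String) (mod_id : String) (context : Int) (max_blocks : Int) (out : List String) : Decidable (Spec_extract_warning_error_block lines mod_id context max_blocks out) := by unfold Spec_extract_warning_error_block; infer_instance

-- ===== CLAIM (what is proved, stated in full; the proofs are below) =====
def Claim_equal_extract_warning_error_block : Prop := ∀ (lines : List String) (mod_id : String) (context : Int) (max_blocks : Int), Dom_extract_warning_error_block lines mod_id context max_blocks → Spec_extract_warning_error_block lines mod_id context max_blocks (extract_warning_error_block lines mod_id context max_blocks)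

-- ===== LEMMAS AND PROOFS =====

-- the line-level error-keyword flag, as a Bool predicate on the lowered line
def pvFlag (low : String) : Bool := pvB_errWords.any (fun w => PySem.Str.isIn w low)

-- the suffix of the prefix table produced from carry c
def pvG : List String → Int → List Int
  | [], _ => []
  | low :: rest, c =>
    (c + (if pvFlag low then 1 else 0)) :: pvG rest (c + (if pvFlag low then 1 else 0))

lemma pvB_prefixLoop_eq : ∀ (lows : List String) (pre : List Int) (c : Int),
    pvB_prefixLoop lows pre c = pre ++ pvG lows c := by
  intro lows
  induction lows with
  | nil => intro pre c; simp [pvB_prefixLoop, pvG]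
  | cons low rest ih =>
    intro pre c
    rw [pvB_prefixLoop, pvG]
    rw [ih]
    simp [pvFlag]

lemma pvG_getElem? : ∀ (lows : List String) (c : Int) (k : Nat), k < lows.length →
    (pvG lows c)[k]? = some (c + ((lows.take (k + 1)).countP pvFlag : Int)) := by
  intro lows
  induction lows with
  | nil => intro c k h; simp at h
  | cons low rest ih =>
    intro c k h
    cases k with
    | zero =>
      rw [pvG]
      simp only [List.getElem?_cons_zero, List.take_succ_cons, List.take_zero,
        List.countP_cons, List.countP_nil]
      by_cases hf : pvFlag low <;> simp [hf]
    | succ k =>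
      rw [pvG]
      simp only [List.getElem?_cons_succ]
      rw [ih _ k (by simpa using h)]
      simp only [List.take_succ_cons, List.countP_cons]
      by_cases hf : pvFlag low <;> simp only [hf] <;> push_cast <;> ring_nf

lemma pvG_length : ∀ (lows : List String) (c : Int), (pvG lows c).length = lows.length := by
  intro lows
  induction lows with
  | nil => intro c; simp [pvG]
  | cons low rest ih => intro c; rw [pvG]; simp [ih]

-- prefix[j] = number of flagged lines among lows[0:j], for 0 ≤ j ≤ len(lows)
lemma pv_prefix_getD (lows : List String) (j : Int) (h0 : 0 ≤ j)
    (hj : j ≤ (lows.length : Int)) :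
    PySem.List.pyGetD (pvB_prefixLoop lows [0] 0) j 0
      = ((lows.take j.toNat).countP pvFlag : Int) := by
  rw [pvB_prefixLoop_eq]
  have hjn : j = ((j.toNat : Nat) : Int) := by omega
  rw [hjn, PySem.List.pyGetD_natCast]
  rcases Nat.eq_zero_or_pos j.toNat with hz | hp
  · rw [hz]; simp
  · have hk : j.toNat - 1 < lows.length := by
      have := pvG_length lows 0
      omega
    have hsplit : j.toNat = (j.toNat - 1) + 1 := by omega
    rw [List.singleton_append, hsplit, List.getD_cons_succ, List.getD_eq_getElem?_getD,
        pvG_getElem? lows 0 (j.toNat - 1) hk]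
    simp

-- xs[a:b] is the list of xs[j] for j in range(a, b), for in-bounds a ≤ b
lemma pv_map_getD_range_slice (xs : List String) (a b : Int)
    (h0 : 0 ≤ a) (hab : a ≤ b) (hb : b ≤ (xs.length : Int)) :
    (PySem.List.pyRange a b 1).map (fun j => PySem.List.pyGetD xs j "")
      = PySem.List.slice xs (some a) (some b) := by
  rw [PySem.List.slice_toNat xs h0 (le_trans h0 hab), PySem.List.pyRange_one, List.map_map]
  apply List.ext_getElem
  · simp; omega
  · intro k hk1 hk2
    simp only [List.getElem_map, List.getElem_range, Function.comp]
    rw [PySem.List.pyGetD_eq_getElem xs "" (by simp at hk1; omega) (by simp at hk1; omega),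
        List.getElem_take, List.getElem_drop]
    congr 1
    simp at hk1
    omega

-- B's O(1) prefix-difference test decides exactly A's window scan
lemma pv_prefix_test (lines : List String) (start fin : Int)
    (h0 : 0 ≤ start) (hsf : start ≤ fin + 1) (hfl : fin + 1 ≤ (lines.length : Int)) :
    (PySem.List.pyGetD (pvB_prefixLoop (lines.map PySem.Str.lower) [0] 0) (fin + 1) 0
      - PySem.List.pyGetD (pvB_prefixLoop (lines.map PySem.Str.lower) [0] 0) start 0 = 0)
    ↔ ((PySem.List.pyRange start (fin + 1) 1).any (fun j =>
        let lj := PySem.Str.lower (PySem.List.pyGetD lines j "")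
        pvA_errWords.any (fun x => PySem.Str.isIn x lj)) = false) := by
  set lows := lines.map PySem.Str.lower with hlows
  have hlen : (lows.length : Int) = (lines.length : Int) := by simp [hlows]
  rw [pv_prefix_getD lows (fin + 1) (by omega) (by omega),
      pv_prefix_getD lows start h0 (by omega)]
  -- split take (fin+1) = take start ++ segment
  have hsplit : lows.take (fin + 1).toNat
      = lows.take start.toNat ++ (lows.drop start.toNat).take ((fin + 1).toNat - start.toNat) := by
    rw [← List.take_add]
    congr 1
    omega
  rw [hsplit, List.countP_append]
  set seg := (lows.drop start.toNat).take ((fin + 1).toNat - start.toNat) with hseg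
  have hLHS : (((lows.take start.toNat).countP pvFlag + seg.countP pvFlag : Nat) : Int)
      - ((lows.take start.toNat).countP pvFlag : Int) = (seg.countP pvFlag : Int) := by
    push_cast; ring
  rw [hLHS]
  -- rewrite A's scan as an any over the slice, i.e. over the segment of lines
  rw [show ((PySem.List.pyRange start (fin + 1) 1).any (fun j =>
        let lj := PySem.Str.lower (PySem.List.pyGetD lines j "")
        pvA_errWords.any (fun x => PySem.Str.isIn x lj)))
      = ((PySem.List.pyRange start (fin + 1) 1).map (fun j => PySem.List.pyGetD lines j "")).any
          (fun s => pvA_errWords.any (fun x => PySem.Str.isIn x (PySem.Str.lower s))) from by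
        rw [List.any_map]; rfl]
  rw [pv_map_getD_range_slice lines start (fin + 1) h0 hsf hfl,
      PySem.List.slice_toNat lines h0 (by omega)]
  have hsegmap : seg = ((lines.drop start.toNat).take ((fin + 1).toNat - start.toNat)).map
      PySem.Str.lower := by
    simp [hseg, hlows, List.map_take, List.map_drop]
  constructor
  · intro h
    have hz : seg.countP pvFlag = 0 := by omega
    rw [List.countP_eq_zero] at hz
    rw [List.any_eq_false]
    intro s hs
    have : PySem.Str.lower s ∈ seg := by rw [hsegmap]; exact List.mem_map_of_mem hs
    have := hz _ this
    simpa [pvFlag, pvB_errWords, pvA_errWords] using this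
  · intro h
    rw [List.any_eq_false] at h
    have hz : seg.countP pvFlag = 0 := by
      rw [List.countP_eq_zero]
      intro low hlow
      rw [hsegmap] at hlow
      rcases List.mem_map.mp hlow with ⟨s, hs, rfl⟩
      have := h s hs
      simpa [pvFlag, pvB_errWords, pvA_errWords] using this
    omega

-- enumerate over the lowered lines is enumerate over the lines, lowered in the second slot
lemma pv_enumerate_map (f : String → String) :
    ∀ (xs : List String) (s : Int),
    PySem.List.enumerate (xs.map f) s = (PySem.List.enumerate xs s).map (fun p => (p.1, f p.2)) := by
  intro xs
  induction xs with
  | nil => intro s; simp [PySem.List.enumerate_nil]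
  | cons x rest ih =>
    intro s
    rw [List.map_cons, PySem.List.enumerate_cons, PySem.List.enumerate_cons, List.map_cons, ih]

-- main loop equivalence: A's fold over match_indexes with used_ranges equals
-- B's fold over the enumerated lowered lines with the prefix table and last_end
lemma pv_loop_eq (lines : List String) (keys : List String) (context limit : Int) :
    ∀ (items : List (Int × String)) (blocks : List String)
      (used : List (Int × Int)) (lastEnd : Option Int),
    items.Pairwise (fun p q => p.1 ≤ q.1) →
    (∀ r ∈ used, ∀ it ∈ items, r.1 ≤ max 0 (it.1 - context)) →
    (lastEnd = none → used = []) →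
    (∀ E, lastEnd = some E → (∃ r ∈ used, r.2 = E) ∧ ∀ r ∈ used, r.2 ≤ E) →
    pvA_loop lines context limit
        ((items.filter (fun p => keys.any (fun k => PySem.Str.isIn k p.2))).map (·.1))
        blocks used
      = pvB_loop lines (pvB_prefixLoop (lines.map PySem.Str.lower) [0] 0) keys context limit
          items blocks lastEnd := by
  intro items
  induction items with
  | nil => intro blocks used lastEnd _ _ _ _; simp [pvA_loop, pvB_loop]
  | cons p rest ih =>
    intro blocks used lastEnd hpair hmono hnone hsome
    obtain ⟨i, low⟩ := p
    rw [List.pairwise_cons] at hpair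
    by_cases hkey : keys.any (fun k => PySem.Str.isIn k low) = true
    · rw [List.filter_cons_of_pos (by simpa using hkey)]
      simp only [List.map_cons, pvA_loop, pvB_loop, hkey, Bool.not_true, Bool.false_eq_true,
        if_false]
      set start := max 0 (i - context) with hstart
      set fin := min ((lines.length : Int) - 1) (i + context) with hfin
      have hstart0 : 0 ≤ start := le_max_left _ _
      by_cases hempty : fin < start
      · rw [if_pos hempty]
        have : PySem.List.pyRange start (fin + 1) 1 = [] :=
          PySem.List.pyRange_one_eq_nil (by omega)
        simp only [this, List.any_nil, Bool.not_false]
        exact ih blocks used lastEnd hpair.2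
          (fun r hr it hit => hmono r hr it (List.mem_cons_of_mem _ hit)) hnone hsome
      · rw [if_neg hempty]
        push Not at hempty
        have hfinlen : fin + 1 ≤ (lines.length : Int) := by omega
        have htest := pv_prefix_test lines start fin hstart0 (by omega) hfinlen
        by_cases hiserr : (PySem.List.pyRange start (fin + 1) 1).any (fun j =>
            let lj := PySem.Str.lower (PySem.List.pyGetD lines j "")
            pvA_errWords.any (fun x => PySem.Str.isIn x lj)) = true
        · -- error keyword present: A's scan fires, B's prefix difference is non-zero
          have hne : ¬ (PySem.List.pyGetD (pvB_prefixLoop (lines.map PySem.Str.lower) [0] 0) (fin + 1) 0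
              - PySem.List.pyGetD (pvB_prefixLoop (lines.map PySem.Str.lower) [0] 0) start 0 = 0) := by
            intro h
            rw [htest.mp h] at hiserr
            exact Bool.false_ne_true hiserr
          rw [hiserr, if_neg hne]
          simp only [Bool.not_true, Bool.false_eq_true, if_false]
          cases lastEnd with
          | none =>
            have hused : used = [] := hnone rfl
            subst hused
            simp only [List.any_nil, Bool.false_eq_true, if_false]
            by_cases hbrk : limit ≤ ((blocks ++ ["--- block around line " ++ PySem.Int.toStr (i + 1) ++ " ---"]
                ++ (PySem.List.pyRange start (fin + 1) 1).map
                     (fun j => PySem.Str.rstrip (PySem.List.pyGetD lines j "")) ++ [""]).length : Int)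
            · rw [if_pos hbrk, if_pos hbrk]
            · rw [if_neg hbrk, if_neg hbrk]
              apply ih _ _ (some fin) hpair.2
              · intro r hr it hit
                rcases List.mem_append.mp hr with hr | hr
                · simp at hr
                · simp only [List.mem_singleton] at hr
                  subst hr
                  have hile : i ≤ it.1 := hpair.1 it hit
                  simp only [hstart]
                  omega
              · intro h; exact absurd h (by simp)
              · intro E hE
                injection hE with hE; subst hE
                refine ⟨⟨(start, fin), by simp⟩, ?_⟩
                intro r hr
                simp only [List.nil_append, List.mem_singleton] at hr
                subst hr; simp
          | some E =>
            obtain ⟨⟨r0, hr0, hr0E⟩, hall⟩ := hsome E rfl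
            by_cases hSE : start ≤ E
            · have hA : (used.any (fun r => !(decide (fin < r.1) || decide (r.2 < start)))) = true := by
                rw [List.any_eq_true]
                refine ⟨r0, hr0, ?_⟩
                have h1 : r0.1 ≤ start := by
                  have h := hmono r0 hr0 (i, low) List.mem_cons_self
                  rw [hstart]; exact h
                have ha : ¬ fin < r0.1 := by omega
                have hb : ¬ r0.2 < start := by omega
                simp [ha, hb]
              rw [if_pos hA, if_pos (decide_eq_true hSE)]
              exact ih blocks used (some E) hpair.2
                (fun r hr it hit => hmono r hr it (List.mem_cons_of_mem _ hit)) hnone hsome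
            · have hA : (used.any (fun r => !(decide (fin < r.1) || decide (r.2 < start)))) = false := by
                rw [List.any_eq_false]
                intro r hr
                have h2 := hall r hr
                have hb : r.2 < start := by omega
                simp [hb]
              have hBskip : (match some E with
                  | some e => decide (start ≤ e)
                  | none => false) = false := by simp [hSE]
              rw [hA, hBskip]
              simp only [Bool.false_eq_true, if_false]
              by_cases hbrk : limit ≤ ((blocks ++ ["--- block around line " ++ PySem.Int.toStr (i + 1) ++ " ---"]
                  ++ (PySem.List.pyRange start (fin + 1) 1).map
                       (fun j => PySem.Str.rstrip (PySem.List.pyGetD lines j "")) ++ [""]).length : Int)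
              · rw [if_pos hbrk, if_pos hbrk]
              · rw [if_neg hbrk, if_neg hbrk]
                apply ih _ _ (some fin) hpair.2
                · intro r hr it hit
                  rcases List.mem_append.mp hr with hr | hr
                  · exact hmono r hr it (List.mem_cons_of_mem _ hit)
                  · simp only [List.mem_singleton] at hr
                    subst hr
                    have hile : i ≤ it.1 := hpair.1 it hit
                    simp only [hstart]
                    omega
                · intro h; exact absurd h (by simp)
                · intro E' hE'
                  injection hE' with hE'; subst hE'
                  refine ⟨⟨(start, fin), by simp⟩, ?_⟩
                  intro r hr
                  rcases List.mem_append.mp hr with hr | hr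
                  · have h2 := hall r hr; omega
                  · simp only [List.mem_singleton] at hr; subst hr; simp
        · -- no error keyword: A's scan is false, B's prefix difference is zero
          rw [Bool.not_eq_true] at hiserr
          have hz : PySem.List.pyGetD (pvB_prefixLoop (lines.map PySem.Str.lower) [0] 0) (fin + 1) 0
              - PySem.List.pyGetD (pvB_prefixLoop (lines.map PySem.Str.lower) [0] 0) start 0 = 0 :=
            htest.mpr hiserr
          rw [hiserr, if_pos hz]
          simp only [Bool.not_false]
          exact ih blocks used lastEnd hpair.2
            (fun r hr it hit => hmono r hr it (List.mem_cons_of_mem _ hit)) hnone hsome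
    · rw [Bool.not_eq_true] at hkey
      rw [List.filter_cons_of_neg (by simpa using hkey)]
      rw [pvB_loop]
      simp only [hkey, Bool.not_false]
      exact ih blocks used lastEnd hpair.2
        (fun r hr it hit => hmono r hr it (List.mem_cons_of_mem _ hit)) hnone hsome

-- A's or-chain condition on a raw line is B's keys.any on the lowered line
lemma pv_cond_eq (m s : String) (p : Int × String) :
    (let l := PySem.Str.lower p.2
     PySem.Str.isIn m l || PySem.Str.isIn s l
     || PySem.Str.isIn "failed to setup plugin" l || PySem.Str.isIn "lacking dependency" l
     || PySem.Str.isIn "enabled plugin" l || PySem.Str.isIn "skipping mod" l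
     || PySem.Str.isIn "loaded pack" l)
    = (pvB_keys m s).any (fun k => PySem.Str.isIn k (PySem.Str.lower p.2)) := by
  simp [pvB_keys, List.any, Bool.or_assoc]

-- A's match-index fold is the filtered enumeration of the lowered lines, projected to indexes
lemma pv_match_indexes (lines : List String) (m s : String) :
    ((PySem.List.enumerate lines).foldl (fun acc p =>
      if (let l := PySem.Str.lower p.2
          PySem.Str.isIn m l || PySem.Str.isIn s l
          || PySem.Str.isIn "failed to setup plugin" l || PySem.Str.isIn "lacking dependency" l
          || PySem.Str.isIn "enabled plugin" l || PySem.Str.isIn "skipping mod" l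
          || PySem.Str.isIn "loaded pack" l) then acc ++ [p.1] else acc) [])
    = (((PySem.List.enumerate (lines.map PySem.Str.lower)).filter (fun p =>
        (pvB_keys m s).any (fun k => PySem.Str.isIn k p.2))).map (·.1)) := by
  have hfun : (fun (acc : List Int) (p : Int × String) =>
      if (let l := PySem.Str.lower p.2
          PySem.Str.isIn m l || PySem.Str.isIn s l
          || PySem.Str.isIn "failed to setup plugin" l || PySem.Str.isIn "lacking dependency" l
          || PySem.Str.isIn "enabled plugin" l || PySem.Str.isIn "skipping mod" l
          || PySem.Str.isIn "loaded pack" l) then acc ++ [p.1] else acc)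
      = (fun acc p =>
          if ((pvB_keys m s).any (fun k => PySem.Str.isIn k (PySem.Str.lower p.2))) = true
          then acc ++ [p.1] else acc) := by
    funext acc p
    rw [pv_cond_eq]
  rw [hfun]
  rw [PySem.List.foldl_append_if
    (fun p : Int × String => (pvB_keys m s).any (fun k => PySem.Str.isIn k (PySem.Str.lower p.2)))
    (·.1) (PySem.List.enumerate lines) []]
  rw [pv_enumerate_map PySem.Str.lower lines 0, List.filter_map, List.map_map]
  simp only [List.nil_append]
  rfl

-- the enumeration carries non-decreasing indexes
lemma pv_enum_pairwise (xs : List String) :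
    (PySem.List.enumerate xs).Pairwise (fun p q => p.1 ≤ q.1) :=
  (PySem.List.pairwise_lt_enumerate xs 0).imp le_of_lt

-- ===== VERDICT (by name: the statement is the Claim_ definition above) =====
theorem extract_warning_error_block_spec : Claim_equal_extract_warning_error_block := by
  intro lines mod_id context max_blocks _
  unfold Spec_extract_warning_error_block
  unfold extract_warning_error_block extract_warning_error_block_alt
  simp only []
  rw [pv_match_indexes]
  congr 1
  exact pv_loop_eq lines _ context _ (PySem.List.enumerate (lines.map PySem.Str.lower)) [] [] none
    (pv_enum_pairwise _) (by simp) (fun _ => rfl) (fun E hE => by cases hE)
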